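-- pv_equiv track=rewrite | github.com/iwootten/adventofcode | 2017/day10.py | dense_hash
-- ===== SOURCE A (Python) =====
-- def chunks(l, n):
--     """Yield successive n-sized chunks from l."""
--     for i in range(0, len(l), n):
--         yield l[i:i + n]
--
-- def dense_hash(l):
--     chunked = chunks(l, 16)
--     hash = []
--
--     for chunk in chunked:
--         val = None
--         for n in chunk:
--             if val is None:
--                 val = n
--             else:
--                 val ^= n
--         hash.append(val)
--     return hash
-- ===== SOURCE B (Python) =====
-- def dense_hash(l):
--     hash = []
--     acc = 0
--     cnt = 0
--     for n in l:
--         acc ^= n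
--         cnt += 1
--         if cnt % 16 == 0:
--             hash.append(acc)
--             acc = 0
--     if cnt % 16:
--         hash.append(acc)
--     return hash
-- ===== Notes on version B (the rewrite author's own statement) =====
-- stated objective: simpler
-- what changed: Replaced the chunk-generator plus per-chunk Optional-seeded XOR reduction by a single streaming pass that XORs into a running accumulator and emits/resets it every 16 elements, flushing a trailing partial chunk.
import Mathlib
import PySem

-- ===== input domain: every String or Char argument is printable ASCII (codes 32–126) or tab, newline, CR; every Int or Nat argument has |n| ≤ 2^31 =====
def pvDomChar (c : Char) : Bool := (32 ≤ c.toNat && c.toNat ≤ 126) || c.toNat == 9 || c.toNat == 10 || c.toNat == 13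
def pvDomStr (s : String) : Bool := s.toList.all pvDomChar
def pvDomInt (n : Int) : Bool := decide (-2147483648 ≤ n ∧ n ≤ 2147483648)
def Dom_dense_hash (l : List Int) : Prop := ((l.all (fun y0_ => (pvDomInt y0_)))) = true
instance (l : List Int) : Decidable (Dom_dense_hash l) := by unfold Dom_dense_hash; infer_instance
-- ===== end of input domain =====

-- B replaces A's chunk-generator + per-chunk Optional-seeded XOR reduction by a single
-- streaming pass (running accumulator, emit/reset every 16 elements, flush a partial tail).


-- ===== PORT A =====
-- chunks(l, 16) materialised: list(range(0, len(l), 16)) mapped to slices l[i:i+16]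
def dense_hash (l : List Int) : List Int :=
  let chunked := (PySem.List.pyRange 0 (l.length : Int) 16).map
      (fun i => PySem.List.slice l (some i) (some (i + 16)))
  chunked.foldl (fun hash chunk =>
    let val := chunk.foldl (fun val n =>
      match val with
      | none => some n
      | some v => some (PySem.Int.bxor v n)) (none : Option Int)
    -- every chunk produced by range(0, len(l), 16) is nonempty, so val is always `some`;
    -- `getD 0` only realises that (Python appends the int val)
    hash ++ [val.getD 0]) []

-- ===== PORT B =====
def dense_hash_alt (l : List Int) : List Int :=
  let s := l.foldl (fun (st : List Int × Int × Int) n =>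
      let acc := PySem.Int.bxor st.2.1 n
      let cnt := st.2.2 + 1
      if PySem.Int.mod cnt 16 = 0 then (st.1 ++ [acc], 0, cnt) else (st.1, acc, cnt))
    ([], 0, 0)
  if PySem.Int.mod s.2.2 16 ≠ 0 then s.1 ++ [s.2.1] else s.1

-- ===== PRECONDITION & SPEC =====
def Spec_dense_hash (l : List Int) (out : List Int) : Prop := out = dense_hash_alt l
instance (l : List Int) (out : List Int) : Decidable (Spec_dense_hash l out) := by unfold Spec_dense_hash; infer_instance

-- ===== CLAIM (what is proved, stated in full; the proofs are below) =====
def Claim_equal_dense_hash : Prop := ∀ (l : List Int), Dom_dense_hash l → Spec_dense_hash l (dense_hash l)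

-- ===== LEMMAS AND PROOFS =====

-- canonical chunking, proof-only helper
def pvChunks (l : List Int) : List (List Int) :=
  if l = [] then [] else l.take 16 :: pvChunks (l.drop 16)
termination_by l.length
decreasing_by
  simp only [List.length_drop]
  have : l.length ≠ 0 := by simpa [List.length_eq_zero_iff] using ‹¬ l = []›
  omega

theorem pvChunks_nil : pvChunks [] = [] := by simp [pvChunks]

theorem pvChunks_cons (l : List Int) (h : l ≠ []) :
    pvChunks l = l.take 16 :: pvChunks (l.drop 16) := by
  rw [pvChunks]; simp [h]

theorem mem_pvChunks_ne_nil (l : List Int) : ∀ c ∈ pvChunks l, c ≠ [] := by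
  induction l using pvChunks.induct with
  | case1 => simp [pvChunks_nil]
  | case2 l h ih =>
    intro c hc
    rw [pvChunks_cons l h] at hc
    rcases List.mem_cons.mp hc with hc2 | hc2
    · subst hc2
      simpa [List.take_eq_nil_iff, List.length_eq_zero_iff] using h
    · exact ih c hc2

-- the step-16 range splits off its head
theorem range16_cons (b : Int) (h : 0 < b) :
    PySem.List.pyRange 0 b 16 = 0 :: (PySem.List.pyRange 0 (b - 16) 16).map (· + 16) := by
  rw [PySem.List.pyRange_of_pos _ _ (by norm_num), PySem.List.pyRange_of_pos _ _ (by norm_num)]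
  have hcount : (if (0:Int) < b then ((b - 0 + 16 - 1) / 16).toNat else 0)
      = (if (0:Int) < b - 16 then ((b - 16 - 0 + 16 - 1) / 16).toNat else 0) + 1 := by
    split_ifs <;> omega
  rw [hcount, List.range_succ_eq_map]
  simp only [List.map_cons, List.map_map]
  refine List.cons_eq_cons.mpr ⟨by norm_num, ?_⟩
  apply List.map_congr_left
  intro k _
  simp only [Function.comp_apply]
  push_cast
  ring

-- the materialised chunk list IS the canonical chunking
theorem chunks_eq (l : List Int) :
    (PySem.List.pyRange 0 (l.length : Int) 16).map
      (fun i => PySem.List.slice l (some i) (some (i + 16))) = pvChunks l := by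
  induction l using pvChunks.induct with
  | case1 =>
    rw [PySem.List.pyRange_of_pos _ _ (by norm_num)]
    simp [pvChunks_nil]
  | case2 l h ih =>
    have hlen : 0 < (l.length : Int) := by
      have := List.length_pos_iff.mpr h
      omega
    rw [range16_cons _ hlen, pvChunks_cons l h]
    simp only [List.map_cons, List.map_map]
    refine List.cons_eq_cons.mpr ⟨?_, ?_⟩
    · -- head chunk: l[0:16] = take 16
      simp only [PySem.List.slice_zero_start]
      rw [PySem.List.slice_to _ (by norm_num : (0:Int) ≤ 0 + 16)]
      norm_num
      congr 1
    · -- tail chunks: shift by 16 = chunks of drop 16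
      rw [← ih]
      have hcast : ((l.drop 16).length : Int) = max ((l.length : Int) - 16) 0 := by
        simp [List.length_drop]
        omega
      by_cases hb : (l.length : Int) ≤ 16
      · have h1 : PySem.List.pyRange 0 ((l.length : Int) - 16) 16 = [] := by
          rw [PySem.List.pyRange_of_pos _ _ (by norm_num)]
          rw [if_neg (by omega)]
          simp
        have h2 : PySem.List.pyRange 0 ((l.drop 16).length : Int) 16 = [] := by
          rw [PySem.List.pyRange_of_pos _ _ (by norm_num)]
          rw [if_neg (by omega)]
          simp
        rw [h1, h2]
        simp
      · rw [show ((l.drop 16).length : Int) = (l.length : Int) - 16 by omega]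
        apply List.map_congr_left
        intro i hi
        have hi0 : 0 ≤ i := by
          have := ((PySem.List.mem_pyRange_iff_of_pos (by norm_num : (0:Int) < 16) i).mp hi).1
          omega
        simp only [Function.comp_apply]
        rw [PySem.List.slice_toNat _ (by omega) (by omega),
            PySem.List.slice_toNat _ hi0 (by omega), List.drop_drop]
        congr 1
        · omega
        · congr 1
          omega

-- A's inner Optional fold, once seeded with its first element
theorem inner_fold (t : List Int) (v : Int) :
    t.foldl (fun val n =>
      match val with
      | none => some n
      | some v => some (PySem.Int.bxor v n)) (some v) = some (t.foldl PySem.Int.bxor v) := by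
  induction t generalizing v with
  | nil => rfl
  | cons x t ih => simp only [List.foldl_cons]; exact ih (PySem.Int.bxor v x)

theorem chunkVal_eq (c : List Int) (hc : c ≠ []) :
    (c.foldl (fun val n =>
      match val with
      | none => some n
      | some v => some (PySem.Int.bxor v n)) (none : Option Int)).getD 0
      = c.foldl PySem.Int.bxor 0 := by
  cases c with
  | nil => exact absurd rfl hc
  | cons h t =>
    simp only [List.foldl_cons, inner_fold, Option.getD_some]
    have h0 : PySem.Int.bxor 0 h = h := by
      rw [PySem.Int.bxor_comm]; exact PySem.Int.bxor_zero h
    rw [h0]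

theorem foldl_append_singleton {α β : Type} (f : α → β) (cs : List α) (acc : List β) :
    cs.foldl (fun h c => h ++ [f c]) acc = acc ++ cs.map f := by
  induction cs generalizing acc with
  | nil => simp
  | cons c cs ih => simp [List.foldl_cons, ih]

theorem dense_hash_eq (l : List Int) :
    dense_hash l = (pvChunks l).map (fun c => c.foldl PySem.Int.bxor 0) := by
  have h := foldl_append_singleton
    (fun chunk : List Int => (chunk.foldl (fun val n =>
      match val with
      | none => some n
      | some v => some (PySem.Int.bxor v n)) (none : Option Int)).getD 0)
    (pvChunks l) []
  simp only [List.nil_append] at h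
  rw [show dense_hash l = ((PySem.List.pyRange 0 (l.length : Int) 16).map
        (fun i => PySem.List.slice l (some i) (some (i + 16)))).foldl
        (fun hash chunk => hash ++ [(chunk.foldl (fun val n =>
          match val with
          | none => some n
          | some v => some (PySem.Int.bxor v n)) (none : Option Int)).getD 0]) [] from rfl,
      chunks_eq, h]
  apply List.map_congr_left
  intro c hc
  exact chunkVal_eq c (mem_pvChunks_ne_nil l c hc)

def pvStep (st : List Int × Int × Int) (n : Int) : List Int × Int × Int :=
  let acc := PySem.Int.bxor st.2.1 n
  let cnt := st.2.2 + 1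
  if PySem.Int.mod cnt 16 = 0 then (st.1 ++ [acc], 0, cnt) else (st.1, acc, cnt)

theorem bstep_partial (c : List Int) (k : Int) :
    ∀ (j : Int) (res : List Int) (acc : Int), 0 ≤ j → j + c.length < 16 →
    c.foldl pvStep (res, acc, 16 * k + j)
      = (res, c.foldl PySem.Int.bxor acc, 16 * k + j + c.length) := by
  induction c with
  | nil => intro j res acc _ _; simp
  | cons x c ih =>
    intro j res acc hj hlen
    simp only [List.length_cons] at hlen
    simp only [List.foldl_cons, pvStep]
    have hc0 : (0:Int) ≤ c.length := by positivity
    split_ifs with hif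
    · exfalso
      rw [PySem.Int.mod_eq_emod_of_pos (by norm_num : (0:Int) < 16)] at hif
      omega
    · have := ih (j + 1) res (PySem.Int.bxor acc x) (by omega) (by push_cast at hlen ⊢; omega)
      rw [show 16 * k + j + 1 = 16 * k + (j + 1) by ring, this]
      simp only [Prod.mk.injEq, List.length_cons, true_and]
      push_cast
      ring

theorem bstep_full (c : List Int) (k : Int) (hlen : c.length = 16)
    (res : List Int) (acc : Int) :
    c.foldl pvStep (res, acc, 16 * k)
      = (res ++ [c.foldl PySem.Int.bxor acc], 0, 16 * (k + 1)) := by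
  rcases List.eq_nil_or_concat c with rfl | ⟨d, x, rfl⟩
  · simp at hlen
  · have hd : (d.length : Int) = 15 := by
      simp [List.concat_eq_append] at hlen
      omega
    simp only [List.concat_eq_append, List.foldl_append]
    rw [show (16 * k : Int) = 16 * k + 0 by ring,
        bstep_partial d k 0 res acc le_rfl (by omega)]
    simp only [List.foldl_cons, List.foldl_nil, pvStep]
    rw [if_pos]
    · simp only [Prod.mk.injEq, true_and]
      omega
    · rw [PySem.Int.mod_eq_emod_of_pos (by norm_num : (0:Int) < 16)]
      omega

theorem bmain : ∀ (l : List Int) (res : List Int) (k : Int),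
    (if PySem.Int.mod (l.foldl pvStep (res, 0, 16 * k)).2.2 16 ≠ 0
     then (l.foldl pvStep (res, 0, 16 * k)).1 ++ [(l.foldl pvStep (res, 0, 16 * k)).2.1]
     else (l.foldl pvStep (res, 0, 16 * k)).1)
      = res ++ (pvChunks l).map (fun c => c.foldl PySem.Int.bxor 0) := by
  intro l
  induction l using pvChunks.induct with
  | case1 =>
    intro res k
    rw [if_neg]
    · simp [pvChunks_nil]
    · simp only [List.foldl_nil, ne_eq, not_not]
      rw [PySem.Int.mod_eq_emod_of_pos (by norm_num : (0:Int) < 16)]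
      omega
  | case2 l h ih =>
    intro res k
    have hpos : 0 < l.length := List.length_pos_iff.mpr h
    by_cases hsmall : l.length < 16
    · have hdrop : l.drop 16 = [] := by
        rw [List.drop_eq_nil_iff]; omega
      have htake : l.take 16 = l := List.take_of_length_le (by omega)
      rw [show (16 * k : Int) = 16 * k + 0 by ring,
          bstep_partial l k 0 res 0 le_rfl (by omega)]
      rw [if_pos (by
        simp only [PySem.Int.mod_eq_emod_of_pos (by norm_num : (0:Int) < 16)]
        omega)]
      rw [pvChunks_cons l h, hdrop, pvChunks_nil, htake]
      simp
    · have hsplit : l = l.take 16 ++ l.drop 16 := (List.take_append_drop 16 l).symm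
      conv_lhs => rw [hsplit]
      simp only [List.foldl_append]
      rw [bstep_full (l.take 16) k (by simp; omega) res 0]
      rw [ih (res ++ [(l.take 16).foldl PySem.Int.bxor 0]) (k + 1)]
      rw [pvChunks_cons l h]
      simp

theorem dense_hash_alt_eq (l : List Int) :
    dense_hash_alt l = (pvChunks l).map (fun c => c.foldl PySem.Int.bxor 0) := by
  have h := bmain l [] 0
  rw [show (16:Int) * 0 = 0 by ring] at h
  exact h

-- ===== VERDICT (by name: the statement is the Claim_ definition above) =====
theorem dense_hash_spec : Claim_equal_dense_hash := by
  intro l _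
  unfold Spec_dense_hash
  rw [dense_hash_eq, dense_hash_alt_eq]
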